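-- pv_equiv track=rewrite | github.com/milsi96/advent-of-code-2024 | src/advent_of_code/day18/main.py | get_maze
-- ===== SOURCE A (Python) =====
-- from typing import DefaultDict, Dict, List, Tuple, TypeAlias
--
-- Point: TypeAlias = Tuple[int, int]
--
-- def get_maze(
--     obstacles: List[Point], height: int, width: int
-- ) -> Tuple[List[Point], Point, Point]:
--     maze: List[Point] = list()
--
--     for row in range(height + 1):
--         for column in range(width + 1):
--             if (row, column) not in obstacles:
--                 maze.append((row, column))
--
--     return maze, (0, 0), (height, width)
-- ===== SOURCE B (Python) =====
-- def get_maze(obstacles, height, width):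
--     obs = sorted({p for p in obstacles
--                   if 0 <= p[0] <= height and 0 <= p[1] <= width})
--     n = len(obs)
--     maze = []
--     i = 0
--     for row in range(height + 1):
--         for column in range(width + 1):
--             if i < n and obs[i] == (row, column):
--                 i += 1
--             else:
--                 maze.append((row, column))
--     return maze, (0, 0), (height, width)
-- ===== Notes on version B (the rewrite author's own statement) =====
-- stated objective: alternative
-- what changed: Replaces A's per-cell linear scan of the obstacle list by sorting the deduplicated in-range obstacles once and emitting the row-major grid in a single merge pass with a pointer into the sorted obstacle list.
import Mathlib
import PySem

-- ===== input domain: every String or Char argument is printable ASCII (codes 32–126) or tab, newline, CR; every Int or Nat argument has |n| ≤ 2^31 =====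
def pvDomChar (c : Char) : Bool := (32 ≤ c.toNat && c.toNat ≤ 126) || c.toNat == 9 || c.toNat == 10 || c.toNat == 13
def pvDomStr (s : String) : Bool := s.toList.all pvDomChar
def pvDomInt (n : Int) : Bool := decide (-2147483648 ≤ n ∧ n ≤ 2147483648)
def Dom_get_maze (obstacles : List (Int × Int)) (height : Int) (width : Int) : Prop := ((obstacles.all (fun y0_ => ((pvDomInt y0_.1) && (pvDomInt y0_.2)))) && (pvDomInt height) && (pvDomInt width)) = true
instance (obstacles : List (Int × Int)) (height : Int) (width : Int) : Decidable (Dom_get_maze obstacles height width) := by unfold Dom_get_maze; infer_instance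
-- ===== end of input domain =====

-- B sorts the (deduplicated, in-range) obstacles once and emits the grid in one merge pass with a pointer, instead of A's per-cell linear scan of the obstacle list.


-- ===== PORT A =====
def get_maze (obstacles : List (Int × Int)) (height : Int) (width : Int) : (List (Int × Int)) × (Int × Int) × (Int × Int) :=
  let maze : List (Int × Int) :=
    (PySem.List.pyRange 0 (height + 1) 1).foldl (fun maze row =>
      (PySem.List.pyRange 0 (width + 1) 1).foldl (fun maze column =>
        if (row, column) ∉ obstacles then maze ++ [(row, column)] else maze) maze) []
  (maze, (0, 0), (height, width))

-- ===== PORT B =====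
def get_maze_alt (obstacles : List (Int × Int)) (height : Int) (width : Int) : (List (Int × Int)) × (Int × Int) × (Int × Int) :=
  let obs : List (Int × Int) :=
    PySem.List.sorted2
      (PySem.Set.ofList (obstacles.filter (fun p => decide (0 ≤ p.1 ∧ p.1 ≤ height ∧ 0 ≤ p.2 ∧ p.2 ≤ width))))
      (fun p => p.1) (fun p => p.2)
  let n : Int := obs.length
  -- state st = (maze so far, pointer i into obs)
  let st :=
    (PySem.List.pyRange 0 (height + 1) 1).foldl (fun st row =>
      (PySem.List.pyRange 0 (width + 1) 1).foldl (fun st column =>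
        if st.2 < n ∧ PySem.List.pyGetD obs st.2 (0, 0) = (row, column)
        then (st.1, st.2 + 1)
        else (st.1 ++ [(row, column)], st.2)) st) (([] : List (Int × Int)), (0 : Int))
  (st.1, (0, 0), (height, width))

-- ===== PRECONDITION & SPEC =====
def Spec_get_maze (obstacles : List (Int × Int)) (height : Int) (width : Int) (out : (List (Int × Int)) × (Int × Int) × (Int × Int)) : Prop := out = get_maze_alt obstacles height width
instance (obstacles : List (Int × Int)) (height : Int) (width : Int) (out : (List (Int × Int)) × (Int × Int) × (Int × Int)) : Decidable (Spec_get_maze obstacles height width out) := by unfold Spec_get_maze; infer_instance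

-- ===== CLAIM (what is proved, stated in full; the proofs are below) =====
def Claim_equal_get_maze : Prop := ∀ (obstacles : List (Int × Int)) (height : Int) (width : Int), Dom_get_maze obstacles height width → Spec_get_maze obstacles height width (get_maze obstacles height width)

-- ===== LEMMAS AND PROOFS =====

-- lexicographic strict order on Int pairs (Python's tuple '<')
def pvLexLt (a b : Int × Int) : Prop := a.1 < b.1 ∨ (a.1 = b.1 ∧ a.2 < b.2)

-- the boolean comparator PySem.List.sorted2 uses for keys fst/snd on Int pairs
def pvLt2 (a b : Int × Int) : Bool :=
  decide (a.1 < b.1) || (!decide (b.1 < a.1) && decide (a.2 < b.2))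

-- lex 'a ≤ b' as sorted2's insertion invariant
def pvLexLe (a b : Int × Int) : Prop := pvLt2 b a = false

theorem pvSorted2_eq_foldl (xs : List (Int × Int)) :
    PySem.List.sorted2 xs (fun p => p.1) (fun p => p.2) =
      xs.foldl (fun acc x => PySem.List.insertBy pvLt2 x acc) [] := rfl

theorem pvLt2_asym (a b : Int × Int) (h : pvLt2 a b = true) : pvLt2 b a = false := by
  unfold pvLt2 at *; simp at *; omega

theorem pvLt2_step (x y z : Int × Int) (h1 : pvLt2 x y = true) (h2 : pvLt2 z y = false) :
    pvLt2 z x = false := by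
  unfold pvLt2 at *; simp at *; omega

theorem pvInsert_pairwise (x : Int × Int) (ys : List (Int × Int))
    (h : ys.Pairwise pvLexLe) :
    (PySem.List.insertBy pvLt2 x ys).Pairwise pvLexLe := by
  induction ys with
  | nil => simp [PySem.List.insertBy]
  | cons y ys ih =>
    rcases List.pairwise_cons.1 h with ⟨hy, hys⟩
    rw [show PySem.List.insertBy pvLt2 x (y :: ys) =
        if pvLt2 x y then x :: y :: ys else y :: PySem.List.insertBy pvLt2 x ys
      from by simp [PySem.List.insertBy]]
    by_cases hxy : pvLt2 x y = true
    · rw [if_pos hxy]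
      refine List.pairwise_cons.2 ⟨?_, h⟩
      intro z hz
      rcases List.mem_cons.1 hz with rfl | hz'
      · exact pvLt2_asym x z hxy
      · exact pvLt2_step x y z hxy (hy z hz')
    · rw [if_neg hxy]
      refine List.pairwise_cons.2 ⟨?_, ih hys⟩
      intro z hz
      rcases (PySem.List.mem_insertBy pvLt2 x z ys).1 hz with rfl | hz'
      · show pvLt2 z y = false
        exact Bool.of_not_eq_true hxy
      · exact hy z hz'

theorem pvFoldl_insert_pairwise (l : List (Int × Int)) :
    ∀ acc : List (Int × Int), acc.Pairwise pvLexLe →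
      (l.foldl (fun acc x => PySem.List.insertBy pvLt2 x acc) acc).Pairwise pvLexLe := by
  induction l with
  | nil => intro acc h; simpa
  | cons x l ih => intro acc h; exact ih _ (pvInsert_pairwise x acc h)

theorem pvSorted2_pairwise (xs : List (Int × Int)) (hnd : xs.Nodup) :
    (PySem.List.sorted2 xs (fun p => p.1) (fun p => p.2)).Pairwise pvLexLt := by
  have hle : (PySem.List.sorted2 xs (fun p => p.1) (fun p => p.2)).Pairwise pvLexLe := by
    rw [pvSorted2_eq_foldl]; exact pvFoldl_insert_pairwise xs [] (by simp)
  have hne : (PySem.List.sorted2 xs (fun p => p.1) (fun p => p.2)).Nodup :=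
    (PySem.List.sorted2_perm xs (fun p => p.1) (fun p => p.2) false).nodup_iff.2 hnd
  refine (hle.and hne).imp ?_
  intro a b h
  obtain ⟨h1, h2⟩ := h
  obtain ⟨a1, a2⟩ := a
  obtain ⟨b1, b2⟩ := b
  unfold pvLexLe pvLt2 at h1
  unfold pvLexLt
  simp at h1 h2 ⊢
  omega

-- the row-major grid
def pvGrid (height width : Int) : List (Int × Int) :=
  (PySem.List.pyRange 0 (height + 1) 1).flatMap
    (fun row => (PySem.List.pyRange 0 (width + 1) 1).map (fun column => (row, column)))

theorem pvGrid_mem (height width : Int) (p : Int × Int) :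
    p ∈ pvGrid height width ↔ 0 ≤ p.1 ∧ p.1 ≤ height ∧ 0 ≤ p.2 ∧ p.2 ≤ width := by
  obtain ⟨p1, p2⟩ := p
  unfold pvGrid
  simp [List.mem_flatMap, List.mem_map, PySem.List.mem_pyRange_one]
  omega

theorem pvGrid_pairwise (height width : Int) : (pvGrid height width).Pairwise pvLexLt := by
  unfold pvGrid
  rw [List.pairwise_flatMap]
  constructor
  · intro r _
    refine List.Pairwise.map _ ?_ (PySem.List.pairwise_lt_pyRange_one 0 (width + 1))
    intro a b hab
    exact Or.inr ⟨rfl, hab⟩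
  · refine (PySem.List.pairwise_lt_pyRange_one 0 (height + 1)).imp ?_
    intro r1 r2 h12 x hx y hy
    simp only [List.mem_map] at hx hy
    obtain ⟨c1, _, rfl⟩ := hx
    obtain ⟨c2, _, rfl⟩ := hy
    exact Or.inl h12

-- A's nested loop is a filter of the grid
theorem pvMazeA_eq (obstacles : List (Int × Int)) (height width : Int) :
    (PySem.List.pyRange 0 (height + 1) 1).foldl (fun maze row =>
      (PySem.List.pyRange 0 (width + 1) 1).foldl (fun maze column =>
        if (row, column) ∉ obstacles then maze ++ [(row, column)] else maze) maze) [] =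
    (pvGrid height width).filter (fun p => decide (p ∉ obstacles)) := by
  have hinner : ∀ (row : Int) (acc : List (Int × Int)),
      (PySem.List.pyRange 0 (width + 1) 1).foldl (fun maze column =>
        if (row, column) ∉ obstacles then maze ++ [(row, column)] else maze) acc =
      acc ++ ((PySem.List.pyRange 0 (width + 1) 1).map (fun column => (row, column))).filter
        (fun p => decide (p ∉ obstacles)) := by
    intro row acc
    rw [PySem.List.foldl_append_ite (fun column => (row, column) ∉ obstacles)
      (fun column => (row, column))]
    rw [List.filter_map]
    rfl
  calc (PySem.List.pyRange 0 (height + 1) 1).foldl (fun maze row =>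
        (PySem.List.pyRange 0 (width + 1) 1).foldl (fun maze column =>
          if (row, column) ∉ obstacles then maze ++ [(row, column)] else maze) maze) []
      = (PySem.List.pyRange 0 (height + 1) 1).foldl (fun maze row =>
          maze ++ ((PySem.List.pyRange 0 (width + 1) 1).map (fun column => (row, column))).filter
            (fun p => decide (p ∉ obstacles))) [] := by
        apply PySem.List.foldl_congr_mem
        intro acc r _
        exact hinner r acc
    _ = (pvGrid height width).filter (fun p => decide (p ∉ obstacles)) := by
        rw [PySem.List.foldl_append_eq_flatMap]
        unfold pvGrid
        rw [List.filter_flatMap]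
        simp

-- B's merge pass over a lex-sorted cell list, against a lex-sorted obstacle list, is a filter
theorem pvMerge (obs : List (Int × Int))
    (hobs : ∀ i j : Nat, i < j → j < obs.length →
      pvLexLt (obs.getD i (0, 0)) (obs.getD j (0, 0))) :
    ∀ g : List (Int × Int), g.Pairwise pvLexLt →
    ∀ (k : Nat) (acc : List (Int × Int)),
    (∀ j : Nat, k ≤ j → j < obs.length → obs.getD j (0, 0) ∈ g) →
    (∀ j : Nat, j < k → j < obs.length → obs.getD j (0, 0) ∉ g) →
    (g.foldl (fun st p =>
        if st.2 < (obs.length : Int) ∧ PySem.List.pyGetD obs st.2 (0, 0) = p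
        then (st.1, st.2 + 1) else (st.1 ++ [p], st.2)) (acc, (k : Int))).1
      = acc ++ g.filter (fun p => decide (p ∉ obs)) := by
  intro g
  induction g with
  | nil => intro _ k acc _ _; simp
  | cons p g ih =>
    intro hg k acc h1 h2
    rcases List.pairwise_cons.1 hg with ⟨hp, hg'⟩
    rw [List.foldl_cons]
    by_cases hc : ((k : Int) < (obs.length : Int) ∧ PySem.List.pyGetD obs (k : Int) (0, 0) = p)
    · rw [if_pos hc]
      obtain ⟨hklt, hget⟩ := hc
      have hk : k < obs.length := by exact_mod_cast hklt
      have hgd : obs.getD k (0, 0) = p := by rwa [PySem.List.pyGetD_natCast] at hget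
      have hmem : p ∈ obs := by
        rw [← hgd, List.getD_eq_getElem _ _ hk]; exact List.getElem_mem hk
      have hcast : ((acc, (k : Int) + 1) : List (Int × Int) × Int) = (acc, ((k + 1 : Nat) : Int)) := by
        push_cast; rfl
      rw [hcast, ih hg' (k + 1) acc ?_ ?_]
      · rw [List.filter_cons]
        simp [hmem]
      · intro j hj hjn
        have hmemj := h1 j (by omega) hjn
        have hne : obs.getD j (0, 0) ≠ p := by
          have hlt := hobs k j (by omega) hjn
          rw [hgd] at hlt
          intro he; rw [he] at hlt; unfold pvLexLt at hlt; omega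
        rcases List.mem_cons.1 hmemj with he | hmm
        · exact absurd he hne
        · exact hmm
      · intro j hj hjn
        by_cases hjk : j < k
        · have := h2 j hjk hjn
          intro hin; exact this (List.mem_cons_of_mem p hin)
        · have hjek : j = k := by omega
          subst hjek
          rw [hgd]
          intro hin
          have := hp p hin
          unfold pvLexLt at this; omega
    · rw [if_neg hc]
      have hnp : p ∉ obs := by
        intro hmem
        obtain ⟨j, hjn, hje⟩ := List.getElem_of_mem hmem
        have hjd : obs.getD j (0, 0) = p := by rw [List.getD_eq_getElem _ _ hjn]; exact hje
        by_cases hjk : j < k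
        · exact h2 j hjk hjn (by rw [hjd]; simp)
        · have hkn : k < obs.length := by omega
          have hkp : obs.getD k (0, 0) ≠ p := by
            intro he
            exact hc ⟨by exact_mod_cast hkn, by rw [PySem.List.pyGetD_natCast]; exact he⟩
          have hjgk : k < j := by
            rcases Nat.lt_or_ge k j with h | h
            · exact h
            · have : j = k := by omega
              subst this; exact absurd hjd hkp
          have hlt1 := hobs k j hjgk hjn
          rw [hjd] at hlt1
          have hkin := h1 k (by omega) hkn
          rcases List.mem_cons.1 hkin with he | hmm
          · exact hkp he
          · have hlt2 := hp _ hmm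
            unfold pvLexLt at hlt1 hlt2; omega
      rw [ih hg' k (acc ++ [p]) ?_ ?_]
      · rw [List.filter_cons]
        simp [hnp]
      · intro j hj hjn
        have hmemj := h1 j hj hjn
        rcases List.mem_cons.1 hmemj with he | hmm
        · have hmo : obs.getD j (0, 0) ∈ obs := by
            rw [List.getD_eq_getElem _ _ hjn]; exact List.getElem_mem hjn
          rw [he] at hmo
          exact absurd hmo hnp
        · exact hmm
      · intro j hj hjn
        have := h2 j hj hjn
        intro hin; exact this (List.mem_cons_of_mem p hin)

-- ===== VERDICT (by name: the statement is the Claim_ definition above) =====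
theorem get_maze_spec : Claim_equal_get_maze := by
  intro obstacles height width _
  unfold Spec_get_maze get_maze get_maze_alt
  simp only
  rw [pvMazeA_eq]
  set obs := PySem.List.sorted2
      (PySem.Set.ofList (obstacles.filter (fun p => decide (0 ≤ p.1 ∧ p.1 ≤ height ∧ 0 ≤ p.2 ∧ p.2 ≤ width))))
      (fun p => p.1) (fun p => p.2) with hobsdef
  have hnest :
      (PySem.List.pyRange 0 (height + 1) 1).foldl (fun st row =>
        (PySem.List.pyRange 0 (width + 1) 1).foldl (fun st column =>
          if st.2 < (obs.length : Int) ∧ PySem.List.pyGetD obs st.2 (0, 0) = (row, column)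
          then (st.1, st.2 + 1)
          else (st.1 ++ [(row, column)], st.2)) st) (([] : List (Int × Int)), (0 : Int)) =
      (pvGrid height width).foldl (fun st p =>
        if st.2 < (obs.length : Int) ∧ PySem.List.pyGetD obs st.2 (0, 0) = p
        then (st.1, st.2 + 1) else (st.1 ++ [p], st.2)) (([] : List (Int × Int)), (0 : Int)) := by
    unfold pvGrid
    rw [List.foldl_flatMap]
    apply PySem.List.foldl_congr_mem
    intro acc r _
    rw [List.foldl_map]
  rw [hnest]
  have hpair : (obs.filter (fun _ => true)).Pairwise pvLexLt := by
    simp only [List.filter_true]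
    exact pvSorted2_pairwise _ (PySem.Set.nodup_ofList _)
  have hobsp : ∀ i j : Nat, i < j → j < obs.length →
      pvLexLt (obs.getD i (0, 0)) (obs.getD j (0, 0)) := by
    intro i j hij hj
    have hp := pvSorted2_pairwise
      (PySem.Set.ofList (obstacles.filter (fun p => decide (0 ≤ p.1 ∧ p.1 ≤ height ∧ 0 ≤ p.2 ∧ p.2 ≤ width))))
      (PySem.Set.nodup_ofList _)
    rw [← hobsdef] at hp
    rw [List.getD_eq_getElem _ _ (by omega), List.getD_eq_getElem _ _ hj]
    exact List.pairwise_iff_getElem.1 hp i j (by omega) hj hij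
  have hmemobs : ∀ p : Int × Int, p ∈ pvGrid height width → (p ∈ obs ↔ p ∈ obstacles) := by
    intro p hpg
    rw [hobsdef, (PySem.List.sorted2_perm _ _ _ false).mem_iff, PySem.Set.mem_ofList,
      List.mem_filter]
    have hcond := (pvGrid_mem height width p).1 hpg
    simp [hcond.1, hcond.2.1, hcond.2.2.1, hcond.2.2.2]
  have h1 : ∀ j : Nat, 0 ≤ j → j < obs.length → obs.getD j (0, 0) ∈ pvGrid height width := by
    intro j _ hj
    have hmo : obs.getD j (0, 0) ∈ obs := by
      rw [List.getD_eq_getElem _ _ hj]; exact List.getElem_mem hj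
    rw [hobsdef, (PySem.List.sorted2_perm _ _ _ false).mem_iff, PySem.Set.mem_ofList,
      List.mem_filter] at hmo
    rw [pvGrid_mem]
    exact of_decide_eq_true hmo.2
  have hmerge := pvMerge obs hobsp (pvGrid height width) (pvGrid_pairwise height width) 0 []
    (fun j _ hj => h1 j (Nat.zero_le j) hj) (fun j hj _ => absurd hj (Nat.not_lt_zero j))
  rw [show ((0 : Nat) : Int) = (0 : Int) from rfl] at hmerge
  rw [hmerge, List.nil_append,
    List.filter_congr (fun p hp => decide_eq_decide.2 (not_congr (hmemobs p hp)))]
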